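-- pv_equiv track=rewrite | github.com/sourav-ganguly/doc-finder-backend | app/ai/service.py | match_specialization
-- ===== SOURCE A (Python) =====
-- def match_specialization(query: str) -> str:
--     """
--     Match a user query to relevant medical specializations.
--     This is a placeholder implementation - replace with actual AI logic.
--
--     Args:
--         query: User's health query or symptoms
--
--     Returns:
--         Semicolon-separated list of specializations
--     """
--     # Simple keyword matching for demonstration
--     query = query.lower()
--
--     if any(kw in query for kw in ["heart", "chest pain", "cardiac"]):
--         return "Cardiology"
--     elif any(kw in query for kw in ["skin", "rash", "acne"]):
--         return "Dermatology"
--     elif any(kw in query for kw in ["brain", "headache", "migraine"]):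
--         return "Neurology"
--     elif any(kw in query for kw in ["bone", "joint", "fracture"]):
--         return "Orthopedics"
--     elif any(kw in query for kw in ["eye", "vision"]):
--         return "Ophthalmology"
--     else:
--         return "General Medicine"
-- ===== SOURCE B (Python) =====
-- # Flat keyword -> priority rank; lower rank = higher priority (same order as A's cascade).
-- KEYWORD_RANK = {
--     "heart": 0, "chest pain": 0, "cardiac": 0,
--     "skin": 1, "rash": 1, "acne": 1,
--     "brain": 2, "headache": 2, "migraine": 2,
--     "bone": 3, "joint": 3, "fracture": 3,
--     "eye": 4, "vision": 4,
-- }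
-- RESULTS = ["Cardiology", "Dermatology", "Neurology", "Orthopedics",
--            "Ophthalmology", "General Medicine"]
--
--
-- def match_specialization(query: str) -> str:
--     q = query.lower()
--     best = 5  # rank of the fallback "General Medicine"
--     for kw, rank in KEYWORD_RANK.items():
--         if rank < best and kw in q:
--             best = rank
--     return RESULTS[best]
-- ===== Notes on version B (the rewrite author's own statement) =====
-- stated objective: alternative
-- what changed: Replaces the if/elif cascade over keyword groups (first match, early return) with a single exhaustive fold over a flat keyword-to-priority map that computes the minimum matching rank, then indexes a results array.
import Mathlib
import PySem

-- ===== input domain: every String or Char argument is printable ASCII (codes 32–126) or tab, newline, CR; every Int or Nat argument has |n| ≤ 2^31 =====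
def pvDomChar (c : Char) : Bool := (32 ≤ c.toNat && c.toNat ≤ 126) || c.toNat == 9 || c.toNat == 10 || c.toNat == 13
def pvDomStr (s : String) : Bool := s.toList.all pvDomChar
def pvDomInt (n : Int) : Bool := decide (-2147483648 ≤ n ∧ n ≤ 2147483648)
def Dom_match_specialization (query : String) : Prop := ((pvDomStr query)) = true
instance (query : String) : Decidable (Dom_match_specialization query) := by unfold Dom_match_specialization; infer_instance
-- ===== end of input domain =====

-- B replaces A's first-match if/elif cascade over keyword groups by an exhaustive
-- min-rank fold over a flat keyword->priority map plus a result-array lookup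
-- (same outputs; objective: alternative).
-- ===== PORT A =====
def match_specialization (query : String) : String :=
  let query := PySem.Str.lower query
  if ["heart", "chest pain", "cardiac"].any (fun kw => PySem.Str.isIn kw query) then
    "Cardiology"
  else if ["skin", "rash", "acne"].any (fun kw => PySem.Str.isIn kw query) then
    "Dermatology"
  else if ["brain", "headache", "migraine"].any (fun kw => PySem.Str.isIn kw query) then
    "Neurology"
  else if ["bone", "joint", "fracture"].any (fun kw => PySem.Str.isIn kw query) then
    "Orthopedics"
  else if ["eye", "vision"].any (fun kw => PySem.Str.isIn kw query) then
    "Ophthalmology"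
  else
    "General Medicine"

-- ===== PORT B =====
-- flat keyword -> priority rank (insertion order of Source B's dict)
def keywordRank : List (String × Nat) :=
  [ ("heart", 0), ("chest pain", 0), ("cardiac", 0),
    ("skin", 1), ("rash", 1), ("acne", 1),
    ("brain", 2), ("headache", 2), ("migraine", 2),
    ("bone", 3), ("joint", 3), ("fracture", 3),
    ("eye", 4), ("vision", 4) ]

def resultsList : List String :=
  ["Cardiology", "Dermatology", "Neurology", "Orthopedics",
   "Ophthalmology", "General Medicine"]

def match_specialization_alt (query : String) : String :=
  let q := PySem.Str.lower query
  let best := keywordRank.foldl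
    (fun best kr => if kr.2 < best && PySem.Str.isIn kr.1 q then kr.2 else best) 5
  -- best is always ≤ 5, so this lookup (Source B's RESULTS[best]) never hits the default
  resultsList.getD best ""

-- ===== PRECONDITION & SPEC =====
def Spec_match_specialization (query : String) (out : String) : Prop := out = match_specialization_alt query
instance (query : String) (out : String) : Decidable (Spec_match_specialization query out) := by unfold Spec_match_specialization; infer_instance

-- ===== CLAIM =====
def Claim_equal_match_specialization : Prop := ∀ (query : String), Dom_match_specialization query → Spec_match_specialization query (match_specialization query)

-- ===== LEMMAS AND PROOFS =====

-- both programs as functions of the 14 keyword-match booleans; checked by case enumeration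
set_option maxHeartbeats 4000000 in
theorem pv_key (b1 b2 b3 b4 b5 b6 b7 b8 b9 b10 b11 b12 b13 b14 : Bool) :
    (if b1 || (b2 || b3) then "Cardiology"
     else if b4 || (b5 || b6) then "Dermatology"
     else if b7 || (b8 || b9) then "Neurology"
     else if b10 || (b11 || b12) then "Orthopedics"
     else if b13 || b14 then "Ophthalmology"
     else "General Medicine")
    = resultsList.getD
        (([(b1, 0), (b2, 0), (b3, 0), (b4, 1), (b5, 1), (b6, 1),
           (b7, 2), (b8, 2), (b9, 2), (b10, 3), (b11, 3), (b12, 3),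
           (b13, 4), (b14, 4)] : List (Bool × Nat)).foldl
          (fun best kr => if kr.2 < best && kr.1 then kr.2 else best) 5) "" := by
  revert b1 b2 b3 b4 b5 b6 b7 b8 b9 b10 b11 b12 b13 b14
  decide

-- ===== VERDICT =====
theorem match_specialization_spec : Claim_equal_match_specialization := by
  intro query _
  unfold Spec_match_specialization match_specialization match_specialization_alt
  simp only [List.any_cons, List.any_nil, Bool.or_false]
  have h1 : keywordRank.foldl
      (fun best kr => if kr.2 < best && PySem.Str.isIn kr.1 (PySem.Str.lower query) then kr.2 else best) 5
      = (keywordRank.map (fun kr => (PySem.Str.isIn kr.1 (PySem.Str.lower query), kr.2))).foldl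
          (fun best kr => if kr.2 < best && kr.1 then kr.2 else best) 5 := by
    rw [List.foldl_map]
  rw [h1]
  exact pv_key (PySem.Str.isIn "heart" (PySem.Str.lower query))
    (PySem.Str.isIn "chest pain" (PySem.Str.lower query))
    (PySem.Str.isIn "cardiac" (PySem.Str.lower query))
    (PySem.Str.isIn "skin" (PySem.Str.lower query))
    (PySem.Str.isIn "rash" (PySem.Str.lower query))
    (PySem.Str.isIn "acne" (PySem.Str.lower query))
    (PySem.Str.isIn "brain" (PySem.Str.lower query))
    (PySem.Str.isIn "headache" (PySem.Str.lower query))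
    (PySem.Str.isIn "migraine" (PySem.Str.lower query))
    (PySem.Str.isIn "bone" (PySem.Str.lower query))
    (PySem.Str.isIn "joint" (PySem.Str.lower query))
    (PySem.Str.isIn "fracture" (PySem.Str.lower query))
    (PySem.Str.isIn "eye" (PySem.Str.lower query))
    (PySem.Str.isIn "vision" (PySem.Str.lower query))
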